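-- pv_equiv track=rewrite | github.com/NanoLine/Bubble-shoot | temp.py | matrix_info_per_element
-- ===== SOURCE A (Python) =====
-- def matrix_info_per_element(matrix, element_searched):
--     max_count_x, max_count_y = 0, 0
--     index_x, index_y = 0, 0
--
--     for column in range(len(matrix[0])):
--         count = 0
--         for vector in matrix:
--             if(vector[column] == element_searched):
--                 count = count + 1
--         if(count > max_count_x):
--             max_count_x = count
--             index_x = column
--
--     for vector in range(len(matrix)):
--         count = 0
--         for element in matrix[vector]:
--             if(element == element_searched):
--                 count = count + 1
--         if(count > max_count_y):
--             max_count_y = count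
--             index_y = vector
--
--     return index_x, index_y
-- ===== SOURCE B (Python) =====
-- def _argmax_first_strict(counts):
--     best = 0
--     idx = 0
--     for i, c in enumerate(counts):
--         if c > best:
--             best = c
--             idx = i
--     return idx
--
--
-- def matrix_info_per_element(matrix, element_searched):
--     col_counts = [0] * len(matrix[0])
--     row_counts = []
--     for row in matrix:
--         col_counts = [c + 1 if row[j] == element_searched else c
--                       for j, c in enumerate(col_counts)]
--         hits = 0
--         for x in row:
--             if x == element_searched:
--                 hits = hits + 1
--         row_counts.append(hits)
--     return _argmax_first_strict(col_counts), _argmax_first_strict(row_counts)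
-- ===== Notes on version B (the rewrite author's own statement) =====
-- stated objective: alternative
-- what changed: B makes a single row-major pass building two count tables (per-column and per-row occurrence counts) and then runs a separate first-strict argmax pass over each table, instead of A's fused column-major nested rescans and fused row argmax.
import Mathlib
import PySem

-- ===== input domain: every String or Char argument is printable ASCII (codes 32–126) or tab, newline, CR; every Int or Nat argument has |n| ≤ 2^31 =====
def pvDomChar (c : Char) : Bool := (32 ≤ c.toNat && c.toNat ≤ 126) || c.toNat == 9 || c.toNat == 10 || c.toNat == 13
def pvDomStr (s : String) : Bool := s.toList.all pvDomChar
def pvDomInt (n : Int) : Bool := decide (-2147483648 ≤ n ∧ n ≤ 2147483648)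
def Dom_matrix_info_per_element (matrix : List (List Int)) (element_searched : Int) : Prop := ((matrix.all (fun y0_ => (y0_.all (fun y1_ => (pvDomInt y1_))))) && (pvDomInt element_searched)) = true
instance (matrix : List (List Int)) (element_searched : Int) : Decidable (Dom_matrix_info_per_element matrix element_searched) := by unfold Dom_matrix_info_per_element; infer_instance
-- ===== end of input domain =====

-- B replaces A's fused column-major rescans by one row-major pass building two count
-- tables followed by separate first-strict argmax passes (objective: alternative).

-- ===== PORT A =====
def matrix_info_per_element (matrix : List (List Int)) (element_searched : Int) : Int × Int :=
  (((PySem.List.pyRange 0 (((PySem.List.pyGetD matrix 0 []).length : Int)) 1).foldl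
      (fun (st : Int × Int) column =>
        if matrix.foldl
            (fun c vector => if PySem.List.pyGetD vector column 0 == element_searched then c + 1 else c)
            (0 : Int) > st.1
        then (matrix.foldl
            (fun c vector => if PySem.List.pyGetD vector column 0 == element_searched then c + 1 else c)
            (0 : Int), column)
        else st) ((0 : Int), (0 : Int))).2,
   ((PySem.List.pyRange 0 ((matrix.length : Int)) 1).foldl
      (fun (st : Int × Int) vector =>
        if (PySem.List.pyGetD matrix vector []).foldl
            (fun c element => if element == element_searched then c + 1 else c) (0 : Int) > st.1
        then ((PySem.List.pyGetD matrix vector []).foldl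
            (fun c element => if element == element_searched then c + 1 else c) (0 : Int), vector)
        else st) ((0 : Int), (0 : Int))).2)

-- ===== PORT B =====
-- first index whose count strictly exceeds the running max (0 when no positive count)
def pvArgmaxFirstStrict (counts : List Int) : Int :=
  ((PySem.List.enumerate counts 0).foldl
    (fun (st : Int × Int) p => if p.2 > st.1 then (p.2, p.1) else st) ((0 : Int), (0 : Int))).2

def matrix_info_per_element_alt (matrix : List (List Int)) (element_searched : Int) : Int × Int :=
  (pvArgmaxFirstStrict
    (matrix.foldl
      (fun (st : List Int × List Int) row =>
        ((PySem.List.enumerate st.1 0).map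
          (fun p => if PySem.List.pyGetD row p.1 0 == element_searched then p.2 + 1 else p.2),
         st.2 ++ [row.foldl (fun c x => if x == element_searched then c + 1 else c) (0 : Int)]))
      (List.replicate (PySem.List.pyGetD matrix 0 []).length 0, ([] : List Int))).1,
   pvArgmaxFirstStrict
    (matrix.foldl
      (fun (st : List Int × List Int) row =>
        ((PySem.List.enumerate st.1 0).map
          (fun p => if PySem.List.pyGetD row p.1 0 == element_searched then p.2 + 1 else p.2),
         st.2 ++ [row.foldl (fun c x => if x == element_searched then c + 1 else c) (0 : Int)]))
      (List.replicate (PySem.List.pyGetD matrix 0 []).length 0, ([] : List Int))).2)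

-- ===== PRECONDITION & SPEC =====
-- Pre_ excludes exactly the inputs on which Python A raises IndexError: the empty
-- matrix (matrix[0]) and ragged matrices with a row shorter than the first row
-- (vector[column]).  A returns on every other input and Pre_ admits all of those.
def Pre_matrix_info_per_element (matrix : List (List Int)) (element_searched : Int) : Prop :=
  matrix ≠ [] ∧ ∀ row ∈ matrix, (matrix.headD []).length ≤ row.length
instance (matrix : List (List Int)) (element_searched : Int) : Decidable (Pre_matrix_info_per_element matrix element_searched) := by unfold Pre_matrix_info_per_element; infer_instance

def pvWitness_matrix_info_per_element : List (List Int) × Int := ([[1, 2], [2, 2]], 2)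

def Spec_matrix_info_per_element (matrix : List (List Int)) (element_searched : Int) (out : Int × Int) : Prop := out = matrix_info_per_element_alt matrix element_searched
instance (matrix : List (List Int)) (element_searched : Int) (out : Int × Int) : Decidable (Spec_matrix_info_per_element matrix element_searched out) := by unfold Spec_matrix_info_per_element; infer_instance

-- ===== CLAIM (what is proved, stated in full; the proofs are below) =====
def Claim_equal_matrix_info_per_element : Prop := ∀ (matrix : List (List Int)) (element_searched : Int), Dom_matrix_info_per_element matrix element_searched → Pre_matrix_info_per_element matrix element_searched → Spec_matrix_info_per_element matrix element_searched (matrix_info_per_element matrix element_searched)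

-- ===== LEMMAS AND PROOFS =====

-- the pair-state fold of B splits into its two independent components
theorem pv_tables_split (matrix : List (List Int)) (e : Int) (cc0 rc0 : List Int) :
    matrix.foldl
      (fun (st : List Int × List Int) row =>
        ((PySem.List.enumerate st.1 0).map
          (fun p => if PySem.List.pyGetD row p.1 0 == e then p.2 + 1 else p.2),
         st.2 ++ [row.foldl (fun c x => if x == e then c + 1 else c) (0 : Int)]))
      (cc0, rc0)
    = (matrix.foldl
        (fun cc row => (PySem.List.enumerate cc 0).map
          (fun p => if PySem.List.pyGetD row p.1 0 == e then p.2 + 1 else p.2)) cc0,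
       rc0 ++ matrix.map (fun row => row.foldl (fun c x => if x == e then c + 1 else c) (0 : Int))) := by
  induction matrix generalizing cc0 rc0 with
  | nil => simp
  | cons row rows ih =>
    simp only [List.foldl_cons, List.map_cons]
    rw [ih]
    simp [List.append_assoc]

-- updating a range-indexed table row by row accumulates the per-column counts
theorem pv_col_table (e : Int) (n : Nat) (rows : List (List Int)) :
    ∀ g : Int → Int,
      rows.foldl
        (fun cc row => (PySem.List.enumerate cc 0).map
          (fun p => if PySem.List.pyGetD row p.1 0 == e then p.2 + 1 else p.2))
        ((PySem.List.pyRange 0 (n : Int) 1).map g)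
      = (PySem.List.pyRange 0 (n : Int) 1).map
          (fun j => rows.foldl
            (fun c v => if PySem.List.pyGetD v j 0 == e then c + 1 else c) (g j)) := by
  induction rows with
  | nil => intro g; rfl
  | cons row rows ih =>
    intro g
    rw [List.foldl_cons]
    have hstep :
        (PySem.List.enumerate ((PySem.List.pyRange 0 (n : Int) 1).map g) 0).map
          (fun p => if PySem.List.pyGetD row p.1 0 == e then p.2 + 1 else p.2)
        = (PySem.List.pyRange 0 (n : Int) 1).map
            (fun j => if PySem.List.pyGetD row j 0 == e then g j + 1 else g j) := by
      rw [PySem.List.enumerate_eq_map_pyRange (d := (0 : Int))]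
      rw [show PySem.List.len ((PySem.List.pyRange 0 (n : Int) 1).map g) = (n : Int) by
        simp [PySem.List.length_pyRange_one]]
      rw [List.map_map]
      apply List.map_congr_left
      intro j hj
      have hb := (PySem.List.mem_pyRange_one).1 hj
      simp only [Function.comp]
      rw [PySem.List.pyGetD_map_pyRange_of_nonneg g (n : Int) j 0 hb.1 hb.2]
    rw [hstep, ih]
    apply List.map_congr_left
    intro j _
    rfl

-- argmax over an explicitly tabulated range equals the fused index loop
theorem pv_argmax_map_range (n : Nat) (g : Int → Int) :
    pvArgmaxFirstStrict ((PySem.List.pyRange 0 (n : Int) 1).map g)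
    = ((PySem.List.pyRange 0 (n : Int) 1).foldl
        (fun (st : Int × Int) j => if g j > st.1 then (g j, j) else st) ((0 : Int), (0 : Int))).2 := by
  unfold pvArgmaxFirstStrict
  rw [PySem.List.enumerate_eq_map_pyRange (d := (0 : Int))]
  rw [show PySem.List.len ((PySem.List.pyRange 0 (n : Int) 1).map g) = (n : Int) by
    simp [PySem.List.length_pyRange_one]]
  have hmap :
      (PySem.List.pyRange 0 (n : Int) 1).map
        (fun j => (j, PySem.List.pyGetD ((PySem.List.pyRange 0 (n : Int) 1).map g) j 0))
      = (PySem.List.pyRange 0 (n : Int) 1).map (fun j => (j, g j)) := by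
    apply List.map_congr_left
    intro j hj
    have hb := (PySem.List.mem_pyRange_one).1 hj
    rw [PySem.List.pyGetD_map_pyRange_of_nonneg g (n : Int) j 0 hb.1 hb.2]
  rw [hmap, List.foldl_map]

-- the replicate initial table is a constant range table
theorem pv_replicate_eq_map_range (n : Nat) :
    List.replicate n (0 : Int) = (PySem.List.pyRange 0 (n : Int) 1).map (fun _ => (0 : Int)) := by
  rw [List.map_const']
  simp [PySem.List.length_pyRange_one]

-- the row-count table indexed through pyGetD recovers each row's count
theorem pv_row_argmax (matrix : List (List Int)) (e : Int) :
    pvArgmaxFirstStrict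
      (matrix.map (fun row => row.foldl (fun c x => if x == e then c + 1 else c) (0 : Int)))
    = ((PySem.List.pyRange 0 (matrix.length : Int) 1).foldl
        (fun (st : Int × Int) j =>
          if (PySem.List.pyGetD matrix j []).foldl
              (fun c x => if x == e then c + 1 else c) (0 : Int) > st.1
          then ((PySem.List.pyGetD matrix j []).foldl
              (fun c x => if x == e then c + 1 else c) (0 : Int), j)
          else st) ((0 : Int), (0 : Int))).2 := by
  unfold pvArgmaxFirstStrict
  rw [PySem.List.enumerate_eq_map_pyRange (d := (0 : Int))]
  rw [show PySem.List.len
        (matrix.map (fun row => row.foldl (fun c x => if x == e then c + 1 else c) (0 : Int)))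
      = (matrix.length : Int) by simp]
  rw [List.foldl_map]
  congr 1
  apply PySem.List.foldl_congr_mem
  intro st j hj
  have hb := (PySem.List.mem_pyRange_one).1 hj
  obtain ⟨k, rfl⟩ : ∃ k : Nat, j = (k : Int) := ⟨j.toNat, by omega⟩
  have hlt : k < matrix.length := by exact_mod_cast hb.2
  simp [PySem.List.pyGetD_natCast, List.getD_eq_getElem?_getD, List.getElem?_map,
        List.getElem?_eq_getElem, hlt]

-- ===== VERDICT (by name: the statement is the Claim_ definition above) =====
theorem matrix_info_per_element_spec : Claim_equal_matrix_info_per_element := by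
  intro matrix e _ _
  unfold Spec_matrix_info_per_element matrix_info_per_element matrix_info_per_element_alt
  rw [pv_tables_split]
  dsimp only
  rw [pv_replicate_eq_map_range, pv_col_table, pv_argmax_map_range, List.nil_append,
      pv_row_argmax]
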